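-- pv_equiv track=rewrite | github.com/kxxjxxl/python-problem-sets | Problem Set 8/string_merge.py | orderedMerge
-- ===== SOURCE A (Python) =====
-- def orderedMerge(a,b):
--     i=0
--     j=0
--     output = ""
--     #to merge the strings
--     while i<len(a) and j<len(b):
--         if a[i]<b[j]:
--             output+=a[i]
--             i=i+1
--         else:
--             output+=b[j]
--             j=j+1
--
--     while i<len(a):
--         output+=a[i]
--         i=i+1
--
--     while j<len(b):
--         output+=b[j]
--         j=j+1
--     return output
-- ===== SOURCE B (Python) =====
-- def orderedMerge(a, b):
--     out = []
--     while a and b: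
--         if a[0] < b[0]:
--             out.append(a[0])
--             a = a[1:]
--         else:
--             out.append(b[0])
--             b = b[1:]
--     return "".join(out) + a + b
-- ===== Notes on version B (the rewrite author's own statement) =====
-- stated objective: simpler
-- what changed: B consumes the two strings from the front (no index variables) in a single loop with a list accumulator, and appends both leftover tails wholesale instead of running two further character-copy loops.
import Mathlib
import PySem

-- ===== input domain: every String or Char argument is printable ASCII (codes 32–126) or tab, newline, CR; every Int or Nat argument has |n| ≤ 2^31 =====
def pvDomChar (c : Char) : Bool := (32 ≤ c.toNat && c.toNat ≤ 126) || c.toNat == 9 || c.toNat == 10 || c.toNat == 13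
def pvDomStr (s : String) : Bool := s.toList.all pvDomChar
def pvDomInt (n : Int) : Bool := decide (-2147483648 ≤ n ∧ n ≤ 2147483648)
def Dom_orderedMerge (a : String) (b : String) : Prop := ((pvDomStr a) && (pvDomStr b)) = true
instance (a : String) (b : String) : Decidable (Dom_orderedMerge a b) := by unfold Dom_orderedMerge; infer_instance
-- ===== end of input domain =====

-- B merges by consuming the strings from the front with one loop and appending the leftover tails; simpler than A's three index-driven loops (return value equivalence).
-- ===== PORT A =====
-- while i<len(a) and j<len(b): … ; returns (output, i, j) at loop exit
def pvA_loop1 (la lb : List Char) (i j : Nat) (out : List Char) : List Char × Nat × Nat :=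
  if h : i < la.length ∧ j < lb.length then
    if la[i]'h.1 < lb[j]'h.2 then
      pvA_loop1 la lb (i+1) j (out ++ [la[i]'h.1])
    else
      pvA_loop1 la lb i (j+1) (out ++ [lb[j]'h.2])
  else (out, i, j)
termination_by (la.length - i) + (lb.length - j)
decreasing_by all_goals omega

-- while i<len(a): output+=a[i]; i=i+1   (used for both trailing loops)
def pvA_loop2 (la : List Char) (i : Nat) (out : List Char) : List Char :=
  if h : i < la.length then pvA_loop2 la (i+1) (out ++ [la[i]]) else out
termination_by la.length - i
decreasing_by omega

def orderedMerge (a : String) (b : String) : String :=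
  let la := a.toList
  let lb := b.toList
  let r := pvA_loop1 la lb 0 0 []
  let out2 := pvA_loop2 la r.2.1 r.1
  let out3 := pvA_loop2 lb r.2.2 out2
  String.mk out3

-- ===== PORT B =====
-- while a and b: pop the smaller front char (ties to b) into out; then out + a + b
def pvB_loop (a b out : List Char) : List Char × List Char × List Char :=
  match a, b with
  | x :: xs, y :: ys =>
      if x < y then pvB_loop xs (y :: ys) (out ++ [x])
      else pvB_loop (x :: xs) ys (out ++ [y])
  | a, b => (out, a, b)

def orderedMerge_alt (a : String) (b : String) : String :=
  let r := pvB_loop a.toList b.toList []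
  String.mk (r.1 ++ r.2.1 ++ r.2.2)

-- ===== PRECONDITION & SPEC =====
def Spec_orderedMerge (a : String) (b : String) (out : String) : Prop := out = orderedMerge_alt a b
instance (a : String) (b : String) (out : String) : Decidable (Spec_orderedMerge a b out) := by unfold Spec_orderedMerge; infer_instance

-- ===== CLAIM (what is proved, stated in full; the proofs are below) =====
def Claim_equal_orderedMerge : Prop := ∀ (a : String) (b : String), Dom_orderedMerge a b → Spec_orderedMerge a b (orderedMerge a b)

-- ===== LEMMAS AND PROOFS =====
theorem pvA_loop2_eq (la : List Char) (i : Nat) (out : List Char) :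
    pvA_loop2 la i out = out ++ la.drop i := by
  fun_induction pvA_loop2 la i out with
  | case1 i out h ih =>
      rw [ih, List.drop_eq_getElem_cons h]
      simp
  | case2 i out h =>
      rw [List.drop_eq_nil_of_le (by omega)]
      simp

theorem pvA_loop1_eq (la lb : List Char) (i j : Nat) (out : List Char)
    (hi : i ≤ la.length) (hj : j ≤ lb.length) :
    pvA_loop1 la lb i j out =
      (fun r => (r.1, la.length - r.2.1.length, lb.length - r.2.2.length))
        (pvB_loop (la.drop i) (lb.drop j) out) ∧
    (pvA_loop1 la lb i j out).2.1 ≤ la.length ∧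
    (pvA_loop1 la lb i j out).2.2 ≤ lb.length := by
  fun_induction pvA_loop1 la lb i j out with
  | case1 i j out h hlt ih =>
      obtain ⟨ih1, ih2, ih3⟩ := ih (by omega) hj
      refine ⟨?_, ih2, ih3⟩
      rw [ih1, List.drop_eq_getElem_cons h.1, List.drop_eq_getElem_cons h.2,
        pvB_loop, if_pos hlt, ← List.drop_eq_getElem_cons h.2]
  | case2 i j out h hlt ih =>
      obtain ⟨ih1, ih2, ih3⟩ := ih hi (by omega)
      refine ⟨?_, ih2, ih3⟩
      rw [ih1, List.drop_eq_getElem_cons h.1, List.drop_eq_getElem_cons h.2,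
        pvB_loop, if_neg hlt, ← List.drop_eq_getElem_cons h.1]
  | case3 i j out h =>
      have hd : (la.drop i = [] ∨ lb.drop j = []) := by
        rcases Nat.lt_or_ge i la.length with h1 | h1
        · right; exact List.drop_eq_nil_of_le (by omega)
        · left; exact List.drop_eq_nil_of_le h1
      have : pvB_loop (la.drop i) (lb.drop j) out = (out, la.drop i, lb.drop j) := by
        rcases hd with h' | h' <;> rw [h'] <;> cases (lb.drop j) <;> cases (la.drop i) <;>
          simp_all [pvB_loop]
      rw [this]
      simp only [List.length_drop]
      exact ⟨by simp; omega, by omega, by omega⟩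

theorem pvB_loop_suffix (a b out : List Char) :
    (pvB_loop a b out).2.1 <:+ a ∧ (pvB_loop a b out).2.2 <:+ b := by
  fun_induction pvB_loop a b out with
  | case1 x xs y ys out hlt ih =>
      exact ⟨ih.1.trans (List.suffix_cons _ _), ih.2⟩
  | case2 x xs y ys out hlt ih =>
      exact ⟨ih.1, ih.2.trans (List.suffix_cons _ _)⟩
  | case3 a b out h => exact ⟨List.suffix_rfl, List.suffix_rfl⟩

-- ===== VERDICT (by name: the statement is the Claim_ definition above) =====
theorem orderedMerge_spec : Claim_equal_orderedMerge := by
  intro a b _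
  unfold Spec_orderedMerge
  show String.mk (pvA_loop2 b.toList (pvA_loop1 a.toList b.toList 0 0 []).2.2
      (pvA_loop2 a.toList (pvA_loop1 a.toList b.toList 0 0 []).2.1 (pvA_loop1 a.toList b.toList 0 0 []).1)) =
    String.mk ((pvB_loop a.toList b.toList []).1 ++ (pvB_loop a.toList b.toList []).2.1 ++ (pvB_loop a.toList b.toList []).2.2)
  obtain ⟨h1, h2, h3⟩ := pvA_loop1_eq a.toList b.toList 0 0 [] (by omega) (by omega)
  simp only [List.drop_zero] at h1
  rw [h1, pvA_loop2_eq, pvA_loop2_eq]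
  simp only []
  obtain ⟨s1, s2⟩ := pvB_loop_suffix a.toList b.toList []
  rw [← List.suffix_iff_eq_drop.mp s1, ← List.suffix_iff_eq_drop.mp s2, List.append_assoc]
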